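-- pv_equiv track=rewrite | github.com/YuneeeM/Python_Algorithm | 프로그래머스/1031-lv1/1103-4.py | solution
-- ===== SOURCE A (Python) =====
-- def solution(k, m, score):
--     answer = 0
--     arr=[]
--     res=[]
--
--     score.sort(reverse=True)
--
--     for i in range(0,len(score),m):
--         for j in range(m):
--             if i+j < len(score):
--                 arr.append(score[i+j])
--         if len(arr) == m:
--             res.append(arr)
--             arr=[]
--
--
--     for i in range(len(res)):
--         answer+=min(res[i])*m
--     return answer
-- ===== SOURCE B (Python) =====
-- def solution(k, m, score):
--     # Sort in place (descending) to preserve A's observable mutation of `score`.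
--     score.sort(reverse=True)
--     answer = 0
--     # In a descending list, the minimum of each full box of m is its last
--     # element, at index m-1, 2m-1, ...; partial trailing boxes are skipped
--     # automatically because the stride never lands inside them.
--     for i in range(m - 1, len(score), m):
--         answer += score[i] * m
--     return answer
-- ===== Notes on version B (the rewrite author's own statement) =====
-- stated objective: simpler
-- what changed: Replaces A's box-building pass (append per element, collect full boxes, then a second pass taking min of each box) by a single strided loop that adds score[i]*m at the last index of each full descending box; no intermediate lists, no min scans.
import Mathlib
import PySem

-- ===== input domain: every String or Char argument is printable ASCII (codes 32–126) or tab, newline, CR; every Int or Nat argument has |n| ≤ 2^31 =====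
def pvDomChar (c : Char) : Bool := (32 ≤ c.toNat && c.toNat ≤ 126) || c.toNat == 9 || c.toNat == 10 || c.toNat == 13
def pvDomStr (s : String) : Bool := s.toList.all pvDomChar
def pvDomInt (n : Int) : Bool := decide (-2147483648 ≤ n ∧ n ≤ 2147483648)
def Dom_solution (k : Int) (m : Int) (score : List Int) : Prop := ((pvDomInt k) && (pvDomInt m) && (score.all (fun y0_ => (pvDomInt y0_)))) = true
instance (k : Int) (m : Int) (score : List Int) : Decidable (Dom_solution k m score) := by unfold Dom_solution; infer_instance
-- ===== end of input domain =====

-- B replaces A's box-building and per-box min passes by one strided loop over the last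
-- index of each full descending box (objective: simpler). Both A and B sort `score` in
-- place in Python; the equivalence proved here is about the return value.

-- ===== PORT A =====
-- pyGetD's defaults below are only reached outside the guards Python itself checks
-- (indexing guarded by `i + j < len(score)`, min taken of boxes of exactly m > 0 elements).
def solution (k : Int) (m : Int) (score : List Int) : Int :=
  let score1 := PySem.List.sorted score (fun x => x) true
  let n : Int := (score1.length : Int)
  let st := (PySem.List.pyRange 0 n m).foldl
    (fun (st : List Int × List (List Int)) i =>
      let arr := (PySem.List.pyRange 0 m 1).foldl
        (fun arr j =>
          if i + j < n then arr ++ [PySem.List.pyGetD score1 (i + j) 0] else arr) st.1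
      if (arr.length : Int) = m then (([] : List Int), st.2 ++ [arr]) else (arr, st.2))
    (([] : List Int), ([] : List (List Int)))
  (PySem.List.pyRange 0 (st.2.length : Int) 1).foldl
    (fun answer i =>
      answer + (PySem.List.min? (PySem.List.pyGetD st.2 i []) (fun x => x)).getD 0 * m) 0

-- ===== PORT B =====
def solution_alt (k : Int) (m : Int) (score : List Int) : Int :=
  let s := PySem.List.sorted score (fun x => x) true
  (PySem.List.pyRange (m - 1) (s.length : Int) m).foldl
    (fun answer i => answer + PySem.List.pyGetD s i 0 * m) 0

-- ===== PRECONDITION & SPEC =====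
-- Pre_ excludes only m = 0, where Python's range(..., step=0) raises ValueError in both A and B.
def Pre_solution (k : Int) (m : Int) (score : List Int) : Prop := m ≠ 0
instance (k : Int) (m : Int) (score : List Int) : Decidable (Pre_solution k m score) := by
  unfold Pre_solution; infer_instance
def pvWitness_solution : Int × Int × List Int := (4, 3, [10, 7, 5, 3, 1])
def Spec_solution (k : Int) (m : Int) (score : List Int) (out : Int) : Prop := out = solution_alt k m score
instance (k : Int) (m : Int) (score : List Int) (out : Int) : Decidable (Spec_solution k m score out) := by unfold Spec_solution; infer_instance

-- ===== CLAIM (what is proved, stated in full; the proofs are below) =====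
def Claim_equal_solution : Prop := ∀ (k : Int) (m : Int) (score : List Int), Dom_solution k m score → Pre_solution k m score → Spec_solution k m score (solution k m score)

-- ===== LEMMAS AND PROOFS =====

def chunks (m : Int) (s : List Int) : List (List Int) :=
  if h : 0 < m ∧ m ≤ (s.length : Int) then
    s.take m.toNat :: chunks m (s.drop m.toNat) else []
  termination_by s.length
  decreasing_by simp; omega

def chunkMinSum (m : Int) (s : List Int) : Int :=
  if h : 0 < m ∧ m ≤ (s.length : Int) then
    (PySem.List.min? (s.take m.toNat) (fun x => x)).getD 0 * m + chunkMinSum m (s.drop m.toNat)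
  else 0
  termination_by s.length
  decreasing_by simp; omega

def chunkLastSum (m : Int) (s : List Int) : Int :=
  if h : 0 < m ∧ m ≤ (s.length : Int) then
    PySem.List.pyGetD s (m - 1) 0 * m + chunkLastSum m (s.drop m.toNat)
  else 0
  termination_by s.length
  decreasing_by simp; omega

theorem pyRange_pos_nil (a b s : Int) (hs : 0 < s) (h : b ≤ a) :
    PySem.List.pyRange a b s = [] := by
  rw [PySem.List.pyRange_of_pos a b hs]
  simp [show ¬ a < b by omega]

theorem pyRange_neg_nil (a b s : Int) (hs : s < 0) (h : a ≤ b) :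
    PySem.List.pyRange a b s = [] := by
  unfold PySem.List.pyRange
  simp [show ¬ s = 0 by omega, show ¬ 0 < s by omega, show ¬ b < a by omega]

theorem pyRange_pos_cons (a b s : Int) (hs : 0 < s) (h : a < b) :
    PySem.List.pyRange a b s = a :: PySem.List.pyRange (a + s) b s := by
  rw [PySem.List.pyRange_of_pos a b hs, PySem.List.pyRange_of_pos (a + s) b hs]
  by_cases h2 : a + s < b
  · have hc : ((b - a + s - 1) / s).toNat = ((b - (a + s) + s - 1) / s).toNat + 1 := by
      have : b - a + s - 1 = (b - (a + s) + s - 1) + 1 * s := by ring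
      rw [this, Int.add_mul_ediv_right _ _ (by omega)]
      have h0 : 0 ≤ (b - (a + s) + s - 1) / s := by
        apply Int.ediv_nonneg <;> omega
      omega
    rw [if_pos h, if_pos h2, hc, List.range_succ_eq_map]
    simp only [List.map_map, List.map_cons]
    refine List.cons_eq_cons.mpr ⟨by simp, ?_⟩
    apply List.map_congr_left; intro k _; simp [Function.comp]; push_cast; ring
  · have hc : ((b - a + s - 1) / s).toNat = 1 := by
      have h1 : 1 ≤ (b - a + s - 1) / s := by
        rw [Int.le_ediv_iff_mul_le hs]; omega
      have h2' : (b - a + s - 1) / s < 2 := by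
        rw [Int.ediv_lt_iff_lt_mul hs]; omega
      omega
    rw [if_pos h, if_neg h2, hc]
    simp

theorem pyRange_pos_shift (a b c s : Int) (hs : 0 < s) :
    PySem.List.pyRange (a + c) (b + c) s = (PySem.List.pyRange a b s).map (· + c) := by
  rw [PySem.List.pyRange_of_pos _ _ hs, PySem.List.pyRange_of_pos a b hs]
  have : b + c - (a + c) = b - a := by ring
  rw [this]
  have he : (a + c < b + c) ↔ (a < b) := by omega
  simp only [he, List.map_map]
  apply List.map_congr_left; intro k _; simp [Function.comp]; ring

theorem pyGetD_add_drop (s : List Int) (c : Nat) (i : Int) (hi : 0 ≤ i) :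
    PySem.List.pyGetD s (i + (c : Int)) 0 = PySem.List.pyGetD (s.drop c) i 0 := by
  have h1 : i + (c : Int) = ((i.toNat + c : Nat) : Int) := by push_cast; omega
  have h2 : i = ((i.toNat : Nat) : Int) := by omega
  rw [h1, h2, PySem.List.pyGetD_natCast, PySem.List.pyGetD_natCast]
  have : (max i 0).toNat = i.toNat := by omega
  simp [List.getD_eq_getElem?_getD, List.getElem?_drop, Nat.add_comm, this]

theorem innerNat : ∀ (M : Nat) (s : List Int) (A0 : List Int),
    (List.range M).foldl
      (fun arr (k : Nat) => if (k : Int) < (s.length : Int) then arr ++ [PySem.List.pyGetD s (k : Int) 0] else arr) A0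
      = A0 ++ s.take M := by
  intro M
  induction M with
  | zero => simp
  | succ M ih =>
    intro s A0
    rw [List.range_succ, List.foldl_append, ih]
    simp only [List.foldl_cons, List.foldl_nil]
    by_cases h : (M : Int) < (s.length : Int)
    · rw [if_pos h, PySem.List.pyGetD_natCast]
      rw [List.take_succ]
      have hM : M < s.length := by omega
      simp [List.getD_eq_getElem?_getD, List.getElem?_eq_getElem hM]
    · rw [if_neg h]
      have : s.take (M + 1) = s.take M := by
        rw [List.take_of_length_le (by omega), List.take_of_length_le (by omega)]
      rw [this]

theorem innerLem (m : Int) (hm : 0 < m) (s : List Int) (A0 : List Int) :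
    (PySem.List.pyRange 0 m 1).foldl
      (fun arr j => if j < (s.length : Int) then arr ++ [PySem.List.pyGetD s j 0] else arr) A0
      = A0 ++ s.take m.toNat := by
  rw [PySem.List.pyRange_one, List.foldl_map]
  simp only [zero_add, Int.sub_zero]
  exact innerNat m.toNat s A0

theorem lemA (m : Int) (hm : 0 < m) : ∀ (N : Nat) (s : List Int), s.length = N →
    ∀ (res0 : List (List Int)),
    ((PySem.List.pyRange 0 (s.length : Int) m).foldl
      (fun (st : List Int × List (List Int)) i =>
        let arr := (PySem.List.pyRange 0 m 1).foldl
          (fun arr j => if i + j < (s.length : Int) then arr ++ [PySem.List.pyGetD s (i + j) 0] else arr) st.1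
        if (arr.length : Int) = m then (([] : List Int), st.2 ++ [arr]) else (arr, st.2))
      (([] : List Int), res0)).2 = res0 ++ chunks m s := by
  intro N
  induction N using Nat.strong_induction_on with
  | _ N IH =>
    intro s hs res0
    by_cases hn : 0 < (s.length : Int)
    · rw [pyRange_pos_cons _ _ _ hm hn, List.foldl_cons]
      simp only [zero_add]
      rw [innerLem m hm s []]
      simp only [List.nil_append]
      by_cases hmn : m ≤ (s.length : Int)
      · rw [if_pos (by simp; omega : (((s.take m.toNat).length : Nat) : Int) = m)]
        have hshift : PySem.List.pyRange m (s.length : Int) m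
            = (PySem.List.pyRange 0 ((s.length : Int) - m) m).map (· + m) := by
          rw [← pyRange_pos_shift 0 _ m m hm]; norm_num
        rw [hshift, List.foldl_map]
        have hstep : ∀ (acc : List Int × List (List Int)), ∀ x ∈ PySem.List.pyRange 0 ((s.length : Int) - m) m,
            ((fun (st : List Int × List (List Int)) i =>
              let arr := (PySem.List.pyRange 0 m 1).foldl
                (fun arr j => if i + j < (s.length : Int) then arr ++ [PySem.List.pyGetD s (i + j) 0] else arr) st.1
              if (arr.length : Int) = m then (([] : List Int), st.2 ++ [arr]) else (arr, st.2)) acc (x + m))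
            = ((fun (st : List Int × List (List Int)) i =>
              let arr := (PySem.List.pyRange 0 m 1).foldl
                (fun arr j => if i + j < ((s.drop m.toNat).length : Int) then arr ++ [PySem.List.pyGetD (s.drop m.toNat) (i + j) 0] else arr) st.1
              if (arr.length : Int) = m then (([] : List Int), st.2 ++ [arr]) else (arr, st.2)) acc x) := by
          intro acc x hx
          rw [PySem.List.mem_pyRange_iff_of_pos hm] at hx
          have harr : (PySem.List.pyRange 0 m 1).foldl
              (fun arr j => if x + m + j < (s.length : Int) then arr ++ [PySem.List.pyGetD s (x + m + j) 0] else arr) acc.1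
              = (PySem.List.pyRange 0 m 1).foldl
              (fun arr j => if x + j < ((s.drop m.toNat).length : Int) then arr ++ [PySem.List.pyGetD (s.drop m.toNat) (x + j) 0] else arr) acc.1 := by
            apply PySem.List.foldl_congr_mem
            intro arr j hj
            rw [PySem.List.mem_pyRange_one] at hj
            have hg : x + m + j = (x + j) + ((m.toNat : Nat) : Int) := by omega
            rw [hg, pyGetD_add_drop s m.toNat _ (by omega)]
            apply if_congr _ rfl rfl
            simp; omega
          simp only []
          rw [harr]
        rw [PySem.List.foldl_congr_mem _ _ _ _ hstep]
        have hlen : ((s.drop m.toNat).length : Int) = (s.length : Int) - m := by simp; omega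
        have := IH (s.drop m.toNat).length (by simp; omega) (s.drop m.toNat) rfl
          (res0 ++ [s.take m.toNat])
        rw [← hlen, this]
        conv_rhs => rw [chunks, dif_pos (⟨hm, hmn⟩ : 0 < m ∧ m ≤ ((s.length : Nat) : Int))]
        simp
      · rw [if_neg (by simp; omega : ¬ (((s.take m.toNat).length : Nat) : Int) = m)]
        rw [pyRange_pos_nil _ _ _ hm (by omega), List.foldl_nil]
        rw [chunks, dif_neg (by omega)]
        simp
    · rw [pyRange_pos_nil _ _ _ hm (by omega), List.foldl_nil]
      rw [chunks, dif_neg (by omega)]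
      simp

theorem lemSum (m : Int) (res : List (List Int)) :
    (PySem.List.pyRange 0 (res.length : Int) 1).foldl
      (fun answer i => answer + (PySem.List.min? (PySem.List.pyGetD res i []) (fun x => x)).getD 0 * m) 0
    = (res.map (fun c => (PySem.List.min? c (fun x => x)).getD 0 * m)).sum := by
  rw [PySem.List.foldl_pyRange_zero_pyGetD' res []
    (fun answer c => answer + (PySem.List.min? c (fun x => x)).getD 0 * m) 0]
  rw [PySem.List.foldl_add]
  simp

theorem lemChunkSum (m : Int) : ∀ (N : Nat) (s : List Int), s.length = N →
    ((chunks m s).map (fun c => (PySem.List.min? c (fun x => x)).getD 0 * m)).sum = chunkMinSum m s := by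
  intro N
  induction N using Nat.strong_induction_on with
  | _ N IH =>
    intro s hs
    by_cases h : 0 < m ∧ m ≤ (s.length : Int)
    · rw [chunks, dif_pos h, chunkMinSum, dif_pos h]
      simp only [List.map_cons, List.sum_cons]
      rw [IH (s.drop m.toNat).length (by simp; omega) _ rfl]
    · rw [chunks, dif_neg h, chunkMinSum, dif_neg h]
      simp

theorem minTake (m : Int) (hm : 0 < m) (s : List Int) (hmn : m ≤ (s.length : Int))
    (hp : s.Pairwise (fun a b => b ≤ a)) :
    (PySem.List.min? (s.take m.toNat) (fun x => x)).getD 0 = PySem.List.pyGetD s (m - 1) 0 := by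
  have hMlen : 1 ≤ m.toNat ∧ m.toNat ≤ s.length := by omega
  have hne : s.take m.toNat ≠ [] := by
    refine List.ne_nil_of_length_pos ?_
    rw [List.length_take]; omega
  obtain ⟨m0, hm0⟩ : ∃ m0, PySem.List.min? (s.take m.toNat) (fun x => x) = some m0 := by
    cases hmin : PySem.List.min? (s.take m.toNat) (fun x => x) with
    | none => exact absurd ((PySem.List.min?_eq_none_iff _ _).mp hmin) hne
    | some v => exact ⟨v, rfl⟩
  rw [hm0]; simp only [Option.getD_some]
  have hidx : PySem.List.pyGetD s (m - 1) 0 = s[m.toNat - 1]'(by omega) := by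
    rw [PySem.List.pyGetD_eq_getElem s 0 (by omega) (by omega)]
    simp only [show (m - 1).toNat = m.toNat - 1 from by omega]
  have hmem_last : s[m.toNat - 1]'(by omega) ∈ s.take m.toNat := by
    rw [← List.getElem_take (xs := s) (j := m.toNat) (i := m.toNat - 1) (h := by simp; omega)]
    exact List.getElem_mem _
  have h1 : m0 ≤ s[m.toNat - 1]'(by omega) := PySem.List.min?_isMin hm0 _ hmem_last
  have h2 : s[m.toNat - 1]'(by omega) ≤ m0 := by
    obtain ⟨i, hi, hieq⟩ := List.mem_iff_getElem.mp (PySem.List.min?_mem hm0)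
    have hi' : i < s.length := by simp at hi; omega
    have hti : (s.take m.toNat)[i]'hi = s[i]'hi' := List.getElem_take
    rcases Nat.lt_or_ge i (m.toNat - 1) with hlt | hge
    · have hle := (List.pairwise_iff_getElem.mp hp) i (m.toNat - 1) hi' (by omega) (by omega)
      rw [← hieq, hti]; exact hle
    · have : i = m.toNat - 1 := by simp at hi; omega
      subst this; rw [← hieq, hti]
  rw [hidx]; exact le_antisymm h1 h2

theorem lemMinLast (m : Int) : ∀ (N : Nat) (s : List Int), s.length = N →
    s.Pairwise (fun a b => b ≤ a) → chunkMinSum m s = chunkLastSum m s := by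
  intro N
  induction N using Nat.strong_induction_on with
  | _ N IH =>
    intro s hs hp
    by_cases h : 0 < m ∧ m ≤ (s.length : Int)
    · rw [chunkMinSum, dif_pos h, chunkLastSum, dif_pos h]
      rw [minTake m h.1 s h.2 hp]
      rw [IH (s.drop m.toNat).length (by simp; omega) _ rfl (hp.drop)]
    · rw [chunkMinSum, dif_neg h, chunkLastSum, dif_neg h]

theorem lemB (m : Int) (hm : 0 < m) : ∀ (N : Nat) (s : List Int), s.length = N → ∀ (a : Int),
    (PySem.List.pyRange (m - 1) (s.length : Int) m).foldl
      (fun answer i => answer + PySem.List.pyGetD s i 0 * m) a = a + chunkLastSum m s := by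
  intro N
  induction N using Nat.strong_induction_on with
  | _ N IH =>
    intro s hs a
    by_cases hmn : m ≤ (s.length : Int)
    · rw [pyRange_pos_cons _ _ _ hm (by omega)]
      rw [List.foldl_cons]
      have hshift : PySem.List.pyRange (m - 1 + m) (s.length : Int) m
          = (PySem.List.pyRange (m - 1) ((s.length : Int) - m) m).map (· + m) := by
        rw [← pyRange_pos_shift _ _ _ _ hm]; norm_num
      rw [hshift, List.foldl_map]
      rw [PySem.List.foldl_congr_mem _ _
        (fun answer i => answer + PySem.List.pyGetD (s.drop m.toNat) i 0 * m) _ ?_]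
      · have hlen : ((s.drop m.toNat).length : Int) = (s.length : Int) - m := by
          simp; omega
        have := IH (s.drop m.toNat).length (by simp; omega) (s.drop m.toNat) rfl
          (a + PySem.List.pyGetD s (m - 1) 0 * m)
        rw [hlen] at this
        rw [this]
        conv_rhs => rw [chunkLastSum, dif_pos (⟨hm, hmn⟩ : 0 < m ∧ m ≤ ((s.length : Nat) : Int))]
        ring
      · intro acc x hx
        rw [PySem.List.mem_pyRange_iff_of_pos hm] at hx
        have : x + m = (x + m - (m.toNat : Int)) + (m.toNat : Int) := by ring
        rw [this, pyGetD_add_drop s m.toNat _ (by omega)]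
        have : x + m - (m.toNat : Int) = x := by omega
        rw [this]
    · rw [pyRange_pos_nil _ _ _ hm (by omega), chunkLastSum, dif_neg (by omega)]
      simp


theorem main_eq (k m : Int) (score : List Int) (hpre : m ≠ 0) :
    solution k m score = solution_alt k m score := by
  simp only [solution, solution_alt]
  rcases lt_trichotomy m 0 with hm | hm | hm
  · rw [pyRange_neg_nil 0 _ m hm (by omega), pyRange_neg_nil (m - 1) _ m hm (by omega)]
    simp [pyRange_pos_nil 0 0 1 one_pos (le_refl 0)]
  · exact absurd hm hpre
  · rw [lemA m hm _ _ rfl []]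
    rw [List.nil_append, lemSum m, lemChunkSum m _ _ rfl]
    rw [lemMinLast m _ _ rfl (PySem.List.sorted_pairwise_rev score (fun x => x))]
    rw [lemB m hm _ _ rfl 0]
    omega

-- ===== VERDICT (by name: the statement is the Claim_ definition above) =====
theorem solution_spec : Claim_equal_solution := by
  intro k m score _hdom hpre
  exact main_eq k m score hpre
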